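-- pv_equiv track=rewrite | github.com/DevOpsMadDog/Fixops | fixops-blended-enterprise/src/services/business_context_processor.py | _analyze_exposure
-- ===== SOURCE A (Python) =====
-- from typing import Dict, Any, Optional, List
--
-- def _analyze_exposure(components: List[Dict], trust_zones: List[Dict]) -> str:
--     """Analyze exposure level from OTM components and trust zones"""
--     # Check for internet-facing components
--     internet_zones = [tz for tz in trust_zones if "internet" in tz.get("name", "").lower()]
--     if internet_zones:
--         return "open"
--
--     # Check for controlled exposure
--     external_zones = [tz for tz in trust_zones if "external" in tz.get("name", "").lower()]
--     if external_zones: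
--         return "controlled"
--
--     return "small"
-- ===== SOURCE B (Python) =====
-- def _analyze_exposure(components, trust_zones):
--     """Priority scoring: each zone gets a severity score (internet=2, external=1, else 0);
--     the maximum score over all zones decodes to the exposure level."""
--     def score(tz):
--         name = tz.get("name", "").lower()
--         if "internet" in name:
--             return 2
--         if "external" in name:
--             return 1
--         return 0
--     best = max(map(score, trust_zones), default=0)
--     return "open" if best == 2 else "controlled" if best == 1 else "small"
-- ===== Notes on version B (the rewrite author's own statement) =====
-- stated objective: alternative
-- what changed: Replaces A's two staged filter passes with a priority-scoring algorithm: each trust zone is mapped to a numeric severity score (internet=2, external=1, else 0), the maximum score over the zones is taken, and the level is decoded from that maximum, turning the keyword priority order into arithmetic.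
import Mathlib
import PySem

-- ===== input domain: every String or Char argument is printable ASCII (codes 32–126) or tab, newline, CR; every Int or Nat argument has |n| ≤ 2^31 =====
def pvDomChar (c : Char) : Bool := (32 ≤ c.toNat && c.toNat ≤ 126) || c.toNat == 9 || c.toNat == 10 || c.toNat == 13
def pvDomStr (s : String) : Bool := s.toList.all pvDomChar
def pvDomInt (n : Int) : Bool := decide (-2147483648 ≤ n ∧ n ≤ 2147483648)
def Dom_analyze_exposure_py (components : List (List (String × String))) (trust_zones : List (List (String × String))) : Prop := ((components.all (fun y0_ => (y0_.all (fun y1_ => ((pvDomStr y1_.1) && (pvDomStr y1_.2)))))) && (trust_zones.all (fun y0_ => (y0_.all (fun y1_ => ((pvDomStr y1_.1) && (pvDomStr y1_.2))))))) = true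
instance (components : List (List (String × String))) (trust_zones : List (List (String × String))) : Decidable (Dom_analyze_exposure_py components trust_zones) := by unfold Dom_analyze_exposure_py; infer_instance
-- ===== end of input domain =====

-- B replaces A's two staged filter passes by priority scoring: each zone is scored (internet=2,
-- external=1, else 0) and the maximum score decodes to the level (objective: alternative).


-- ===== PORT A =====
-- "internet" in tz.get("name", "").lower()
def pvHasInternet (tz : List (String × String)) : Bool :=
  PySem.Str.isIn "internet" (PySem.Str.lower (PySem.Dict.getD (PySem.Dict.mk tz) "name" ""))

def pvHasExternal (tz : List (String × String)) : Bool :=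
  PySem.Str.isIn "external" (PySem.Str.lower (PySem.Dict.getD (PySem.Dict.mk tz) "name" ""))

def analyze_exposure_py (components : List (List (String × String))) (trust_zones : List (List (String × String))) : String :=
  let internet_zones := trust_zones.filter pvHasInternet
  if !internet_zones.isEmpty then "open"
  else
    let external_zones := trust_zones.filter pvHasExternal
    if !external_zones.isEmpty then "controlled"
    else "small"

-- ===== PORT B =====
-- score(tz): 2 if "internet" in name, 1 if "external" in name, else 0
def pvScore (tz : List (String × String)) : Nat :=
  let name := PySem.Str.lower (PySem.Dict.getD (PySem.Dict.mk tz) "name" "")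
  if PySem.Str.isIn "internet" name then 2
  else if PySem.Str.isIn "external" name then 1
  else 0

def analyze_exposure_py_alt (components : List (List (String × String))) (trust_zones : List (List (String × String))) : String :=
  let best := (trust_zones.map pvScore).foldl Nat.max 0
  if best == 2 then "open" else if best == 1 then "controlled" else "small"

-- ===== PRECONDITION & SPEC =====
def Spec_analyze_exposure_py (components : List (List (String × String))) (trust_zones : List (List (String × String))) (out : String) : Prop := out = analyze_exposure_py_alt components trust_zones
instance (components : List (List (String × String))) (trust_zones : List (List (String × String))) (out : String) : Decidable (Spec_analyze_exposure_py components trust_zones out) := by unfold Spec_analyze_exposure_py; infer_instance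

-- ===== CLAIM =====
def Claim_equal_analyze_exposure_py : Prop := ∀ (components : List (List (String × String))) (trust_zones : List (List (String × String))), Dom_analyze_exposure_py components trust_zones → Spec_analyze_exposure_py components trust_zones (analyze_exposure_py components trust_zones)

-- ===== LEMMAS AND PROOFS =====

-- The level A would choose on a zone list, as a number.
def pvLevel (l : List (List (String × String))) : Nat :=
  if l.any pvHasInternet then 2 else if l.any pvHasExternal then 1 else 0

theorem pvLevel_le_two (l : List (List (String × String))) : pvLevel l ≤ 2 := by
  unfold pvLevel; split_ifs <;> omega

-- B's max-fold over scores computes max b (pvLevel l).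
theorem pv_max_level (h : List (String × String)) (t : List (List (String × String))) :
    Nat.max (pvScore h) (pvLevel t) = pvLevel (h :: t) := by
  have ht := pvLevel_le_two t
  unfold pvScore pvLevel pvHasInternet pvHasExternal at *
  simp only [List.any_cons]
  by_cases hi : PySem.Str.isIn "internet"
      (PySem.Str.lower (PySem.Dict.getD (PySem.Dict.mk h) "name" "")) <;>
    by_cases he : PySem.Str.isIn "external"
      (PySem.Str.lower (PySem.Dict.getD (PySem.Dict.mk h) "name" "")) <;>
    simp only [hi, he, Bool.true_or, Bool.false_or, if_true] <;>
    split_ifs at ht ⊢ <;> simp_all [Nat.max_def]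

theorem pv_fold_score (l : List (List (String × String))) (b : Nat) :
    (l.map pvScore).foldl Nat.max b = Nat.max b (pvLevel l) := by
  induction l generalizing b with
  | nil => simp [pvLevel]
  | cons h t ih =>
    rw [List.map_cons, List.foldl_cons, ih, ← pv_max_level]
    exact Nat.max_assoc b _ _

theorem pv_filter_isEmpty {α : Type} (p : α → Bool) (l : List α) :
    (l.filter p).isEmpty = !l.any p := by
  induction l with
  | nil => simp
  | cons h t ih => by_cases hp : p h <;> simp [hp, ih]

-- ===== VERDICT =====
theorem analyze_exposure_py_spec : Claim_equal_analyze_exposure_py := by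
  intro components trust_zones _
  unfold Spec_analyze_exposure_py analyze_exposure_py analyze_exposure_py_alt
  rw [pv_fold_score]
  simp only [pv_filter_isEmpty, Bool.not_not, Nat.zero_max]
  unfold pvLevel
  split_ifs <;> simp_all
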